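-- pv_equiv track=rewrite | github.com/Pangpyo/TIL | Baekjoon/Bj16120.py | solution
-- ===== SOURCE A (Python) =====
-- def solution(word):
--     stack = []
--     for i in range(len(word)):
--         stack.append(word[i])
--         if len(stack) >= 4:
--             if "".join(stack[-4::]) == "PPAP":
--                 for _ in range(3):
--                     stack.pop()
--     stack = "".join(stack)
--     if stack == "P":
--         return "PPAP"
--     else:
--         return "NP"
-- ===== SOURCE B (Python) =====
-- def solution(word):
--     # recursive-descent parser for the grammar S -> 'P' | 'P' S 'A' S
--     n = len(word)
--
--     def parse(i):
--         # parse one S starting at i; return the end index, or -1 on failure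
--         if i >= n or word[i] != 'P':
--             return -1
--         j = parse(i + 1)
--         if j != -1 and j < n and word[j] == 'A':
--             k = parse(j + 1)
--             if k != -1:
--                 return k
--         return i + 1
--
--     return "PPAP" if parse(0) == n else "NP"
-- ===== Notes on version B (the rewrite author's own statement) =====
-- stated objective: alternative
-- what changed: Replaces the explicit stack machine (push each character, pop three whenever the top four spell PPAP) by a recursive-descent parser for the grammar S -> P | P S A S that accepts iff a single S consumes the whole word.
import Mathlib
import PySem

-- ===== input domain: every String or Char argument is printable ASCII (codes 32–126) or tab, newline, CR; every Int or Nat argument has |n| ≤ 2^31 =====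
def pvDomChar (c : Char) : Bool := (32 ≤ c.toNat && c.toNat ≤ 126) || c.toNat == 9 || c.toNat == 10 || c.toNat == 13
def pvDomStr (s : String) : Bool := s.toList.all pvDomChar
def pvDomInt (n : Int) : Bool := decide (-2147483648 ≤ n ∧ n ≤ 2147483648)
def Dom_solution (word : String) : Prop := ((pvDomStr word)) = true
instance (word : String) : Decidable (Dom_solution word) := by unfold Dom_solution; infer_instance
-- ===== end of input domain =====

-- B re-implements A's stack/reduce machine as a recursive-descent parser for the
-- grammar S -> P | P S A S: a different algorithm with the same return value.


-- ===== PORT A =====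
-- one iteration of A's loop: stack.append(word[i]); if the last four are "PPAP", pop three
def pyStep (stack : List Char) (c : Char) : List Char :=
  let stack := stack ++ [c]
  if 4 ≤ stack.length then
    if String.ofList (PySem.List.slice stack (some (-4)) none) = "PPAP" then
      (List.range 3).foldl (fun st _ => st.dropLast) stack   -- for _ in range(3): stack.pop()
    else stack
  else stack

def solution (word : String) : String :=
  let stack := word.toList.foldl pyStep []
  let stackS := String.ofList stack     -- stack = "".join(stack)
  if stackS = "P" then "PPAP" else "NP"

-- ===== PORT B =====
-- Source B's parse(i): parse one S (grammar S -> 'P' | 'P' S 'A' S) greedily; the Lean port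
-- works on the remaining suffix instead of an index and returns the leftover suffix
-- (Source B's end index; its -1 becomes none).  The length proof inside the subtype is only
-- the termination guard for the non-structural recursive call.
def parseS : (u : List Char) → Option { r : List Char // r.length < u.length }
  | [] => none
  | c :: rest =>
    if c = 'P' then
      match parseS rest with
      | some ⟨'A' :: r2, hr⟩ =>
        match parseS r2 with
        | some ⟨r3, h3⟩ => some ⟨r3, by simp at hr ⊢; omega⟩
        | none => some ⟨rest, by simp⟩
      | _ => some ⟨rest, by simp⟩
    else none
termination_by u => u.length
decreasing_by
  · simp
  · simp at hr ⊢; omega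

def solution_alt (word : String) : String :=
  match parseS word.toList with
  | some ⟨[], _⟩ => "PPAP"   -- parse(0) == len(word)
  | _ => "NP"

-- ===== PRECONDITION & SPEC =====
def Spec_solution (word : String) (out : String) : Prop := out = solution_alt word
instance (word : String) (out : String) : Decidable (Spec_solution word out) := by unfold Spec_solution; infer_instance

-- ===== CLAIM (what is proved, stated in full; the proofs are below) =====
def Claim_equal_solution : Prop := ∀ (word : String), Dom_solution word → Spec_solution word (solution word)

-- ===== LEMMAS AND PROOFS =====

-- A's machine in top-first (reversed-stack) form: push c, reducing "PPAP" at the top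
def push1 (c : Char) (s : List Char) : List Char :=
  if c = 'P' ∧ s.take 3 = ['A', 'P', 'P'] then 'P' :: s.drop 3 else c :: s

def red (s : List Char) (u : List Char) : List Char := u.foldl (fun s c => push1 c s) s

def parse' (u : List Char) : Option (List Char) := (parseS u).map Subtype.val

-- greedy tokenization: each maximal parsed S becomes one 'P', any other leading char is copied
def sigTok : (u : List Char) → List Char
  | [] => []
  | c :: rest =>
    if c = 'P' then
      match parseS (c :: rest) with
      | some ⟨r, _⟩ => 'P' :: sigTok r
      | none => []
    else c :: sigTok rest
termination_by u => u.length
decreasing_by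
  · omega
  · simp

theorem parse'_nil : parse' [] = none := by
  simp [parse', parseS]

theorem red_cons (s : List Char) (c : Char) (u : List Char) :
    red s (c :: u) = red (push1 c s) u := rfl

theorem ofList_inj (l l' : List Char) :
    (String.ofList l = String.ofList l') ↔ l = l' :=
  ⟨fun h => by simpa using congrArg String.toList h, fun h => by rw [h]⟩

theorem parse'_cons (c : Char) (rest : List Char) :
    parse' (c :: rest) =
      if c = 'P' then
        (match parse' rest with
         | some ('A' :: r2) =>
            (match parse' r2 with
             | some r3 => some r3
             | none => some rest)
         | _ => some rest)
      else none := by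
  unfold parse'
  rw [parseS]
  by_cases hc : c = 'P' <;> simp [hc]
  rcases h1 : parseS rest with _ | ⟨v, hv⟩
  · simp
  · rcases v with _ | ⟨a, r2⟩
    · simp
    · by_cases ha : a = 'A'
      · subst ha
        rcases h2 : parseS r2 with _ | ⟨w, hw⟩ <;> simp [h2]
      · simp [ha]

theorem parse'_length : ∀ u r, parse' u = some r → r.length < u.length := by
  intro u r h
  unfold parse' at h
  rcases h1 : parseS u with _ | ⟨v, hv⟩ <;> rw [h1] at h
  · simp at h
  · simp at h; subst h; exact hv

theorem parse'_isSome_of_P (rest : List Char) : parse' ('P' :: rest) ≠ none := by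
  rw [parse'_cons]
  simp
  rcases h : parse' rest with _ | ⟨_ | ⟨a, r2⟩⟩
  · simp
  · simp
  · by_cases ha : a = 'A'
    · subst ha; rcases h2 : parse' r2 with _ | r3 <;> simp [h2]
    · simp [ha]

theorem push1_id (s : List Char) :
    push1 'P' (push1 'A' (push1 'P' (push1 'P' s))) = push1 'P' s := by
  by_cases h : s.take 3 = ['A', 'P', 'P'] <;>
    simp [push1, h]

theorem parse_red : ∀ n u, u.length ≤ n → ∀ r, parse' u = some r →
    ∀ s, red s u = red (push1 'P' s) r := by
  intro n
  induction n with
  | zero =>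
    intro u hu r h s
    have := parse'_length u r h
    omega
  | succ n ih =>
    intro u hu r h s
    rcases u with _ | ⟨c, rest⟩
    · rw [parse'_nil] at h; exact absurd h (by simp)
    · rw [parse'_cons] at h
      by_cases hc : c = 'P'
      case neg => simp [hc] at h
      subst hc
      rw [red_cons]
      rcases h1 : parse' rest with _ | ⟨_ | ⟨a, r2⟩⟩ <;> rw [h1] at h
      · simp at h; subst h; rfl
      · simp at h; subst h; rfl
      · by_cases ha : a = 'A'
        · subst ha
          simp at h
          rcases h2 : parse' r2 with _ | r3 <;> rw [h2] at h <;> simp at h <;> subst h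
          · rfl
          · have hrest : rest.length ≤ n := by simp at hu; omega
            have hr2 : r2.length ≤ n := by
              have := parse'_length rest _ h1
              simp at this hu; omega
            calc red (push1 'P' s) rest
                = red (push1 'P' (push1 'P' s)) ('A' :: r2) := ih rest hrest _ h1 _
              _ = red (push1 'A' (push1 'P' (push1 'P' s))) r2 := red_cons _ _ _
              _ = red (push1 'P' (push1 'A' (push1 'P' (push1 'P' s)))) r3 := ih r2 hr2 _ h2 _
              _ = red (push1 'P' s) r3 := by rw [push1_id]
        · simp [ha] at h; subst h; rfl

theorem parse_greedy : ∀ n u, u.length ≤ n → ∀ r r'',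
    parse' u = some r → parse' r = some ('A' :: r'') → parse' r'' ≠ none → False := by
  intro n
  induction n with
  | zero =>
    intro u hu r r'' h _ _
    have := parse'_length u r h; omega
  | succ n ih =>
    intro u hu r r'' h h2 h3
    rcases u with _ | ⟨c, rest⟩
    · rw [parse'_nil] at h; exact absurd h (by simp)
    · rw [parse'_cons] at h
      by_cases hc : c = 'P'
      case neg => simp [hc] at h
      subst hc
      rcases h1 : parse' rest with _ | ⟨_ | ⟨a, r2⟩⟩ <;> rw [h1] at h
      · simp at h; subst h; rw [h1] at h2; exact absurd h2 (by simp)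
      · simp at h; subst h; rw [h1] at h2; simp at h2
      · by_cases ha : a = 'A'
        · subst ha
          simp at h
          rcases hx : parse' r2 with _ | r3 <;> rw [hx] at h <;> simp at h <;> subst h
          · rw [h1] at h2; simp at h2; subst h2; exact h3 hx
          · have hr2 : r2.length ≤ n := by
              have := parse'_length rest _ h1
              simp at this hu; omega
            exact ih r2 hr2 r3 r'' hx h2 h3
        · simp [ha] at h; subst h
          rw [h1] at h2; simp at h2
          exact absurd h2.1 ha

theorem sigTok_cons_inv (u : List Char) (x : Char) (t : List Char)
    (h : sigTok u = x :: t) :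
    (x = 'P' ∧ ∃ r, parse' u = some r ∧ t = sigTok r) ∨
    (x ≠ 'P' ∧ ∃ rest, u = x :: rest ∧ t = sigTok rest) := by
  rcases u with _ | ⟨c, rest⟩
  · simp [sigTok] at h
  · rw [sigTok] at h
    by_cases hc : c = 'P'
    · subst hc
      rcases h1 : parseS ('P' :: rest) with _ | ⟨v, hv⟩ <;> rw [h1] at h
      · simp at h
      · simp at h
        left
        exact ⟨h.1.symm, v, by simp [parse', h1], h.2.symm⟩
    · simp [hc] at h
      right
      exact ⟨h.1 ▸ hc, rest, by rw [h.1], h.2.symm⟩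

theorem sigTok_nil (u : List Char) (h : sigTok u = []) : u = [] := by
  rcases u with _ | ⟨c, rest⟩
  · rfl
  · rw [sigTok] at h
    by_cases hc : c = 'P'
    · subst hc
      rcases h1 : parseS ('P' :: rest) with _ | ⟨v, hv⟩ <;> rw [h1] at h
      · exact absurd (by simp [parse', h1] : parse' ('P' :: rest) = none)
          (parse'_isSome_of_P rest)
      · simp at h
    · simp [hc] at h

theorem sigTok_noPPAP : ∀ n u, u.length ≤ n → ∀ l m,
    sigTok u ≠ l ++ ['P', 'P', 'A', 'P'] ++ m := by
  intro n
  induction n with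
  | zero =>
    intro u hu l m h
    have : u = [] := by rcases u with _ | _ <;> simp_all
    subst this; simp [sigTok] at h
  | succ n ih =>
    intro u hu l m h
    rcases l with _ | ⟨x, l'⟩
    · -- occurrence at the front: tokens S, S, 'A', S — contradicts greediness
      simp at h
      obtain ⟨-, r, hpr, hrt⟩ | ⟨hx, -⟩ := sigTok_cons_inv u 'P' _ h
      case inr => exact hx rfl
      obtain ⟨-, r2, hpr2, hrt2⟩ | ⟨hx, -⟩ := sigTok_cons_inv r 'P' _ hrt.symm
      case inr => exact hx rfl
      obtain ⟨hx, -⟩ | ⟨-, r3, hr2eq, hrt3⟩ := sigTok_cons_inv r2 'A' _ hrt2.symm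
      case inl => exact absurd hx (by decide)
      obtain ⟨-, r4, hpr3, -⟩ | ⟨hx, -⟩ := sigTok_cons_inv r3 'P' _ hrt3.symm
      case inr => exact hx rfl
      exact parse_greedy u.length u le_rfl r r3 hpr (hr2eq ▸ hpr2) (by simp [hpr3])
    · -- occurrence inside the tail
      simp at h
      obtain ⟨_, r, hpr, hrt⟩ | ⟨_, rest, hrest, hrt⟩ := sigTok_cons_inv u x _ h
      · have hlen : r.length ≤ n := by
          have := parse'_length u r hpr
          omega
        exact ih r hlen l' m (by simpa using hrt.symm)
      · have hlen : rest.length ≤ n := by subst hrest; simp at hu; omega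
        exact ih rest hlen l' m (by simpa using hrt.symm)

theorem red_sigTok : ∀ n u, u.length ≤ n → ∀ s,
    red s u = (sigTok u).foldl (fun s c => push1 c s) s := by
  intro n
  induction n with
  | zero =>
    intro u hu s
    have : u = [] := by rcases u with _ | _ <;> simp_all
    subst this; simp [sigTok, red]
  | succ n ih =>
    intro u hu s
    rcases u with _ | ⟨c, rest⟩
    · simp [sigTok, red]
    · rw [sigTok]
      by_cases hc : c = 'P'
      · subst hc
        rcases h1 : parseS ('P' :: rest) with _ | ⟨v, hv⟩
        · exact absurd (by simp [parse', h1] : parse' ('P' :: rest) = none)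
            (parse'_isSome_of_P rest)
        · have hp : parse' ('P' :: rest) = some v := by simp [parse', h1]
          rw [parse_red ('P' :: rest).length _ le_rfl _ hp s]
          have hvlen : v.length ≤ n := by simp at hu hv ⊢; omega
          rw [ih v hvlen (push1 'P' s)]
          simp
      · simp only [if_neg hc]
        rw [red_cons, ih rest (by simp at hu; omega) (push1 c s)]
        simp [List.foldl]

theorem foldl_push1_irred : ∀ (t s : List Char),
    (∀ l m, t.reverse ++ s ≠ l ++ ['P', 'A', 'P', 'P'] ++ m) →
    t.foldl (fun s c => push1 c s) s = t.reverse ++ s := by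
  intro t
  induction t with
  | nil => intro s _; simp
  | cons c t' ih =>
    intro s hno
    have hstep : push1 c s = c :: s := by
      by_cases hc : c = 'P' ∧ s.take 3 = ['A', 'P', 'P']
      · exfalso
        obtain ⟨hc1, hc2⟩ := hc
        have hs : s = ['A', 'P', 'P'] ++ s.drop 3 := by
          conv_lhs => rw [← List.take_append_drop 3 s]
          rw [hc2]
        exact hno t'.reverse (s.drop 3)
          (by subst hc1; rw [List.reverse_cons]
              conv_lhs => rw [hs]
              simp)
      · simp [push1, hc]
    rw [List.foldl_cons, hstep, ih (c :: s)
      (by intro l m hx; exact hno l m (by rw [List.reverse_cons]; simpa using hx))]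
    simp

-- A's literal loop body is the top-first step, modulo reversing the stack
theorem pyStep_eq (t : List Char) (d b a c : Char) :
    pyStep (t.reverse ++ [d, b, a]) c = (push1 c (t.reverse ++ [d, b, a]).reverse).reverse := by
  rw [pyStep, push1]
  have : (t.reverse ++ [d, b, a]).reverse = a :: b :: d :: t := by simp
  rw [this]
  have hlen : (t.reverse ++ [d, b, a] ++ [c]).length = t.length + 4 := by simp
  rw [PySem.List.slice_from_neg_ofNat _ 4 (by omega)]
  have hdrop : (t.reverse ++ [d, b, a] ++ [c]).drop ((t.reverse ++ [d, b, a] ++ [c]).length - 4)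
      = [d, b, a, c] := by
    have h2 : t.reverse ++ [d, b, a] ++ [c] = t.reverse ++ [d, b, a, c] := by simp
    rw [h2, List.length_append]
    simp
  rw [hdrop]
  have hPPAP : ∀ l : List Char, (String.ofList l = "PPAP") ↔ l = ['P', 'P', 'A', 'P'] :=
    fun l => ⟨fun h => by simpa using congrArg String.toList h, fun h => by rw [h]⟩
  by_cases hcond : d = 'P' ∧ b = 'P' ∧ a = 'A' ∧ c = 'P'
  · obtain ⟨h1, h2, h3, h4⟩ := hcond
    subst h1; subst h2; subst h3; subst h4
    rw [if_pos (by simp), if_pos (by rw [hPPAP])]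
    rw [if_pos (by simp)]
    simp [List.range_succ]
  · rw [if_pos (by simp), if_neg (by rw [hPPAP]; simp; intro p1 p2 p3; simp_all)]
    rw [if_neg (by simp; intro p1 p2 p3; simp_all)]
    simp

theorem pyStep_eq' (s : List Char) (c : Char) :
    pyStep s c = (push1 c s.reverse).reverse := by
  rcases hs : s.reverse with _ | ⟨a, t1⟩
  · have : s = [] := by simpa using congrArg List.reverse hs
    subst this; simp [pyStep, push1]
  · rcases t1 with _ | ⟨b, t2⟩
    · have : s = [a] := by simpa using congrArg List.reverse hs
      subst this; simp [pyStep, push1]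
    · rcases t2 with _ | ⟨d, t⟩
      · have : s = [b, a] := by simpa using congrArg List.reverse hs
        subst this; simp [pyStep, push1]
      · have hsv : s = t.reverse ++ [d, b, a] := by simpa using congrArg List.reverse hs
        subst hsv
        simpa using pyStep_eq t d b a c

theorem foldl_pyStep (u : List Char) : ∀ s, u.foldl pyStep s = (red s.reverse u).reverse := by
  induction u with
  | nil => intro s; simp [red]
  | cons c u' ih =>
    intro s
    rw [List.foldl_cons, ih (pyStep s c), pyStep_eq' s c, red_cons]
    simp

theorem stack_eq_sigTok (u : List Char) : u.foldl pyStep [] = sigTok u := by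
  rw [foldl_pyStep u []]
  have h1 : red ([] : List Char).reverse u = red [] u := by simp
  rw [h1, red_sigTok u.length u le_rfl []]
  rw [foldl_push1_irred (sigTok u) []]
  · simp
  · intro l m hx
    simp only [List.append_nil] at hx
    have : sigTok u = m.reverse ++ ['P', 'P', 'A', 'P'] ++ l.reverse := by
      have := congrArg List.reverse hx
      simpa using this
    exact sigTok_noPPAP u.length u le_rfl m.reverse l.reverse this

theorem sigTok_singleton (u : List Char) : sigTok u = ['P'] ↔ parse' u = some [] := by
  constructor
  · intro h
    obtain ⟨-, r, hpr, hrt⟩ | ⟨hx, -⟩ := sigTok_cons_inv u 'P' [] h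
    · have : r = [] := sigTok_nil r hrt.symm
      subst this; exact hpr
    · exact absurd rfl hx
  · intro h
    rcases u with _ | ⟨c, rest⟩
    · rw [parse'_nil] at h; exact absurd h (by simp)
    · have hc : c = 'P' := by
        by_contra hc
        rw [parse'_cons, if_neg hc] at h
        exact absurd h (by simp)
      subst hc
      rw [sigTok]
      rcases h1 : parseS ('P' :: rest) with _ | ⟨v, hv⟩
      · exact absurd (by simp [parse', h1] : parse' ('P' :: rest) = none)
          (parse'_isSome_of_P rest)
      · have : v = [] := by
          have : parse' ('P' :: rest) = some v := by simp [parse', h1]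
          rw [this] at h; simpa using h
        subst this
        simp [sigTok]

-- ===== VERDICT (by name: the statement is the Claim_ definition above) =====
theorem solution_spec : Claim_equal_solution := by
  unfold Claim_equal_solution Spec_solution
  intro word _
  unfold solution solution_alt
  rw [stack_eq_sigTok word.toList]
  by_cases h : parse' word.toList = some []
  · rw [if_pos (by rw [(sigTok_singleton word.toList).mpr h])]
    rcases h1 : parseS word.toList with _ | ⟨v, hv⟩
    · simp [parse', h1] at h
    · simp [parse', h1] at h
      subst h
      rfl
  · rw [if_neg ?hne]
    case hne =>
      intro hx
      have : sigTok word.toList = ['P'] := by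
        have := (ofList_inj (sigTok word.toList) ['P']).mp (by simpa using hx)
        exact this
      exact h ((sigTok_singleton word.toList).mp this)
    rcases h1 : parseS word.toList with _ | ⟨v, hv⟩
    · rfl
    · rcases v with _ | ⟨x, xs⟩
      · exact absurd (by simp [parse', h1]) h
      · rfl
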